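-- pv_equiv track=rewrite | github.com/loning/mbook-binary | src/binaryuniverse/tests/test_T10_3.py | detect_period
-- ===== SOURCE A (Python) =====
-- from typing import List, Dict, Tuple, Any, Set
--
-- def detect_period(sequence: List[str]) -> Dict[str, int]:
--     """检测序列中的周期"""
--     n = len(sequence)
--
--     if n < 2:
--         return {'period': 0, 'start': 0}
--
--     # Floyd判圈算法
--     for period_len in range(1, n // 2 + 1):
--         for start_pos in range(n - 2 * period_len):
--             # 检查是否存在周期
--             is_periodic = True
--             for i in range(period_len):
--                 if (start_pos + i + period_len < n and
--                     sequence[start_pos + i] != sequence[start_pos + i + period_len]):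
--                     is_periodic = False
--                     break
--
--             if is_periodic:
--                 return {'period': period_len, 'start': start_pos}
--
--     return {'period': 0, 'start': 0}
-- ===== SOURCE B (Python) =====
-- def detect_period(sequence):
--     """Per period length, one pass over the equality array counting the current
--     run of matches; first run of length p gives the answer."""
--     n = len(sequence)
--     for p in range(1, n // 2 + 1):
--         run = 0
--         for j in range(n - p - 1):
--             if sequence[j] == sequence[j + p]:
--                 run += 1
--                 if run == p:
--                     return {'period': p, 'start': j - p + 1}
--             else:
--                 run = 0
--     return {'period': 0, 'start': 0}
-- ===== Notes on version B (the rewrite author's own statement) =====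
-- stated objective: alternative
-- what changed: Instead of re-testing every window from scratch (for each period length, for each start, compare the two blocks element by element), B makes one pass per period length over the shift-equality comparisons, keeping a running count of consecutive matches and returning as soon as the run reaches the period length; it trades the nested window re-checks for a single run-counting scan per shift.
import Mathlib
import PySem

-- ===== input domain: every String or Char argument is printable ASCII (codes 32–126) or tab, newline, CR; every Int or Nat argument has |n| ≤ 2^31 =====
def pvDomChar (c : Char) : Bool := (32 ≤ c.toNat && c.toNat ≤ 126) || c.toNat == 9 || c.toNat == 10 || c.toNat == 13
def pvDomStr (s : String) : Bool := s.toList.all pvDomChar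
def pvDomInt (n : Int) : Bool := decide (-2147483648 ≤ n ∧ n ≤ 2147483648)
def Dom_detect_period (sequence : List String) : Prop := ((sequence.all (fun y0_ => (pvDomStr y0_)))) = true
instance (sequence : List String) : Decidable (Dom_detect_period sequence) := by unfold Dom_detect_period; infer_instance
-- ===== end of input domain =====

-- B replaces A's per-window block comparison by a single run-counting pass per
-- period length over the shift-equality tests (an alternative algorithm).

-- ===== PORT A =====
-- inner `for i in range(period_len)` loop with its `is_periodic = False; break`
def pvACheck (sequence : List String) (n p s : Int) : List Int → Bool
  | [] => true
  | i :: rest =>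
    if decide (s + i + p < n) &&
        (PySem.List.pyGet? sequence (s + i) != PySem.List.pyGet? sequence (s + i + p)) then
      false
    else pvACheck sequence n p s rest

-- middle `for start_pos in range(n - 2 * period_len)` loop with its early return
def pvAStart (sequence : List String) (n p : Int) : List Int → Option Int
  | [] => none
  | s :: rest =>
    if pvACheck sequence n p s (PySem.List.pyRange 0 p) then some s
    else pvAStart sequence n p rest

-- outer `for period_len in range(1, n // 2 + 1)` loop
def pvAMain (sequence : List String) (n : Int) : List Int → List (String × Int)
  | [] => [("period", 0), ("start", 0)]
  | p :: rest =>
    match pvAStart sequence n p (PySem.List.pyRange 0 (n - 2 * p)) with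
    | some s => [("period", p), ("start", s)]
    | none => pvAMain sequence n rest

def detect_period (sequence : List String) : List (String × Int) :=
  if (sequence.length : Int) < 2 then [("period", 0), ("start", 0)]
  else pvAMain sequence (sequence.length : Int)
    (PySem.List.pyRange 1 (PySem.Int.floordiv (sequence.length : Int) 2 + 1))

-- ===== PORT B =====
-- inner `for j in range(n - p - 1)` loop carrying the run counter, early return
def pvBScan (sequence : List String) (p run : Int) : List Int → Option Int
  | [] => none
  | j :: rest =>
    if PySem.List.pyGet? sequence j == PySem.List.pyGet? sequence (j + p) then
      if run + 1 == p then some (j - p + 1)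
      else pvBScan sequence p (run + 1) rest
    else pvBScan sequence p 0 rest

-- outer `for p in range(1, n // 2 + 1)` loop
def pvBMain (sequence : List String) (n : Int) : List Int → List (String × Int)
  | [] => [("period", 0), ("start", 0)]
  | p :: rest =>
    match pvBScan sequence p 0 (PySem.List.pyRange 0 (n - p - 1)) with
    | some s => [("period", p), ("start", s)]
    | none => pvBMain sequence n rest

def detect_period_alt (sequence : List String) : List (String × Int) :=
  pvBMain sequence (sequence.length : Int)
    (PySem.List.pyRange 1 (PySem.Int.floordiv (sequence.length : Int) 2 + 1))

-- ===== PRECONDITION & SPEC =====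
def Spec_detect_period (sequence : List String) (out : List (String × Int)) : Prop := out = detect_period_alt sequence
instance (sequence : List String) (out : List (String × Int)) : Decidable (Spec_detect_period sequence out) := by unfold Spec_detect_period; infer_instance

-- ===== CLAIM (what is proved, stated in full; the proofs are below) =====
def Claim_equal_detect_period : Prop := ∀ (sequence : List String), Dom_detect_period sequence → Spec_detect_period sequence (detect_period sequence)

-- ===== LEMMAS AND PROOFS =====

-- e[j] : sequence[j] == sequence[j + p]
def pvE (sequence : List String) (pN j : Nat) : Bool :=
  PySem.List.pyGet? sequence (j : Int) == PySem.List.pyGet? sequence ((j + pN : Nat) : Int)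

-- window starting at s is periodic with period pN
def pvAllB (sequence : List String) (pN s : Nat) : Bool :=
  (List.range pN).all (fun i => pvE sequence pN (s + i))

lemma pvAll_congr {α : Type} (l : List α) (f g : α → Bool) (h : ∀ x ∈ l, f x = g x) :
    l.all f = l.all g := by
  induction l with
  | nil => rfl
  | cons a t ih => simp [List.all_cons, h a (by simp), ih (fun x hx => h x (by simp [hx]))]

lemma pvFind?_congr {α : Type} (l : List α) (f g : α → Bool) (h : ∀ x ∈ l, f x = g x) :
    l.find? f = l.find? g := by
  induction l with
  | nil => rfl
  | cons a t ih =>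
    rw [List.find?_cons, List.find?_cons, h a (by simp), ih (fun x hx => h x (by simp [hx]))]

lemma pvFind?_range_some (q : Nat → Bool) (m s0 : Nat) (h1 : s0 < m) (h2 : q s0 = true)
    (h0 : ∀ s, s < s0 → q s = false) : (List.range m).find? q = some s0 := by
  induction m with
  | zero => omega
  | succ m ih =>
    rw [List.range_succ, List.find?_append]
    rcases Nat.lt_or_ge s0 m with h | h
    · rw [ih h]; rfl
    · have hs : s0 = m := by omega
      subst hs
      have hnone : (List.range s0).find? q = none := by
        rw [List.find?_eq_none]; intro x hx; simp [h0 x (List.mem_range.mp hx)]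
      rw [hnone]
      simp [List.find?, h2]

lemma pvACheck_eq_all (sequence : List String) (n p s : Int) (l : List Int) :
    pvACheck sequence n p s l
      = l.all (fun i => !(decide (s + i + p < n) &&
          (PySem.List.pyGet? sequence (s + i) != PySem.List.pyGet? sequence (s + i + p)))) := by
  induction l with
  | nil => rfl
  | cons i t ih =>
    rw [pvACheck, List.all_cons]
    by_cases h : (decide (s + i + p < n) &&
        (PySem.List.pyGet? sequence (s + i) != PySem.List.pyGet? sequence (s + i + p))) = true
    · simp [h]
    · rw [if_neg (by simp [h]), ih]
      simp only [Bool.not_eq_true] at h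
      simp [h]

lemma pvAStart_eq_find? (sequence : List String) (n p : Int) (l : List Int) :
    pvAStart sequence n p l
      = l.find? (fun s => pvACheck sequence n p s (PySem.List.pyRange 0 p)) := by
  induction l with
  | nil => rfl
  | cons s t ih =>
    rw [pvAStart, List.find?_cons]
    by_cases h : pvACheck sequence n p s (PySem.List.pyRange 0 p) = true
    · simp [h]
    · rw [if_neg (by simp [h]), ih]
      simp only [Bool.not_eq_true] at h
      simp [h]

lemma pvACheck_all (sequence : List String) (pN sN : Nat)
    (hs : sN + 2 * pN < sequence.length) :
    pvACheck sequence (sequence.length : Int) (pN : Int) (sN : Int) (PySem.List.pyRange 0 (pN : Int))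
      = pvAllB sequence pN sN := by
  rw [pvACheck_eq_all, PySem.List.pyRange_zero_natCast, List.all_map, pvAllB]
  apply pvAll_congr
  intro i hi
  have hi' := List.mem_range.mp hi
  have hc : ((sN : Int) + i + pN < (sequence.length : Int)) := by omega
  have e1 : ((sN + i : Nat) : Int) = (sN : Int) + (i : Int) := by push_cast; ring
  have e2 : ((sN + i + pN : Nat) : Int) = (sN : Int) + (i : Int) + (pN : Int) := by push_cast; ring
  simp only [Function.comp, pvE, e1, e2]
  rw [decide_eq_true hc]
  cases h : (PySem.List.pyGet? sequence ((sN : Int) + i)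
      == PySem.List.pyGet? sequence ((sN : Int) + i + pN)) <;> simp [bne, h]

lemma pvBScan_eq (sequence : List String) (pN : Nat) (hp : 1 ≤ pN) :
    ∀ (fuel : Nat), ∀ (j r : Nat), r < pN → r ≤ j →
      (∀ k, j ≤ k + r → k < j → pvE sequence pN k = true) →
      (∀ s, s + r < j → pvAllB sequence pN s = false) →
      pvBScan sequence (pN : Int) (r : Int) (List.map (fun k : Nat => (k : Int)) (List.range' j fuel))
        = Option.map (fun s : Nat => (s : Int))
            ((List.range (j + fuel + 1 - pN)).find? (pvAllB sequence pN)) := by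
  intro fuel
  induction fuel with
  | zero =>
    intro j r hrp hrj hrun hfail
    have hnone : (List.range (j + 0 + 1 - pN)).find? (pvAllB sequence pN) = none := by
      rw [List.find?_eq_none]
      intro s hs
      have hs' := List.mem_range.mp hs
      simp [hfail s (by omega)]
    rw [hnone]; rfl
  | succ fuel ih =>
    intro j r hrp hrj hrun hfail
    rw [List.range'_succ, List.map_cons, pvBScan]
    have ecast : (j : Int) + (pN : Int) = ((j + pN : Nat) : Int) := by push_cast; ring
    by_cases hE : pvE sequence pN j = true
    · have hE' : (PySem.List.pyGet? sequence (j : Int)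
          == PySem.List.pyGet? sequence ((j : Int) + (pN : Int))) = true := by
        rw [ecast]; exact hE
      rw [if_pos hE']
      by_cases hr : r + 1 = pN
      · have hbeq : ((r : Int) + 1 == (pN : Int)) = true := by
          rw [beq_iff_eq]; omega
        rw [if_pos hbeq]
        have hall : pvAllB sequence pN (j + 1 - pN) = true := by
          rw [pvAllB, List.all_eq_true]
          intro i hi
          have hi' := List.mem_range.mp hi
          by_cases hk : j + 1 - pN + i < j
          · exact hrun _ (by omega) hk
          · have : j + 1 - pN + i = j := by omega
            rw [this]; exact hE
        have hpre : ∀ s, s < j + 1 - pN → pvAllB sequence pN s = false := by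
          intro s hs; exact hfail s (by omega)
        rw [pvFind?_range_some (pvAllB sequence pN) _ (j + 1 - pN) (by omega) hall hpre]
        have : (j : Int) - (pN : Int) + 1 = ((j + 1 - pN : Nat) : Int) := by omega
        rw [this]; rfl
      · have hbeq : ((r : Int) + 1 == (pN : Int)) = false := by
          rw [beq_eq_false_iff_ne]; intro h; apply hr
          have : ((r : Nat) + 1 : Int) = ((pN : Nat) : Int) := by push_cast; omega
          exact_mod_cast this
        have hcond : ¬ (((r : Int) + 1 == (pN : Int)) = true) := by
          rw [hbeq]; exact Bool.false_ne_true
        rw [if_neg hcond]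
        have ecr : (r : Int) + 1 = ((r + 1 : Nat) : Int) := by omega
        rw [ecr, ih (j + 1) (r + 1) (by omega) (by omega)
          (by intro k hk1 hk2
              by_cases hkj : k < j
              · exact hrun k (by omega) hkj
              · have : k = j := by omega
                rw [this]; exact hE)
          (by intro s hs; exact hfail s (by omega))]
        have : j + 1 + fuel + 1 - pN = j + (fuel + 1) + 1 - pN := by omega
        rw [this]
    · have hEf : pvE sequence pN j = false := by
        cases hpe : pvE sequence pN j
        · rfl
        · exact absurd hpe hE
      have hE' : (PySem.List.pyGet? sequence (j : Int)
          == PySem.List.pyGet? sequence ((j : Int) + (pN : Int))) = false := by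
        rw [ecast]; exact hEf
      have hcond : ¬ ((PySem.List.pyGet? sequence (j : Int)
          == PySem.List.pyGet? sequence ((j : Int) + (pN : Int))) = true) := by
        rw [hE']; exact Bool.false_ne_true
      rw [if_neg hcond]
      have e0 : (0 : Int) = ((0 : Nat) : Int) := rfl
      rw [e0, ih (j + 1) 0 (by omega) (by omega)
        (by intro k hk1 hk2; omega)
        (by intro s hs
            by_cases hold : s + r < j
            · exact hfail s hold
            · rw [pvAllB, List.all_eq_false]
              refine ⟨j - s, List.mem_range.mpr (by omega), ?_⟩
              have : s + (j - s) = j := by omega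
              rw [this]
              exact hE)]
      have : j + 1 + fuel + 1 - pN = j + (fuel + 1) + 1 - pN := by omega
      rw [this]

lemma pvInner_eq (sequence : List String) (p : Int) (hp : 1 ≤ p)
    (h2 : 2 * p ≤ (sequence.length : Int)) :
    pvBScan sequence p 0 (PySem.List.pyRange 0 ((sequence.length : Int) - p - 1))
      = pvAStart sequence (sequence.length : Int) p
          (PySem.List.pyRange 0 ((sequence.length : Int) - 2 * p)) := by
  obtain ⟨pN, rfl⟩ : ∃ pN : Nat, p = (pN : Int) := ⟨p.toNat, by omega⟩
  have hp' : 1 ≤ pN := by exact_mod_cast hp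
  have h2' : 2 * pN ≤ sequence.length := by exact_mod_cast h2
  -- B side
  have hB := pvBScan_eq sequence pN hp' (sequence.length - pN - 1) 0 0 (by omega) (by omega)
    (by intro k hk1 hk2; omega) (by intro s hs; omega)
  rw [Nat.cast_zero] at hB
  have ecnt : 0 + (sequence.length - pN - 1) + 1 - pN = sequence.length - 2 * pN := by omega
  rw [ecnt] at hB
  have e1 : (sequence.length : Int) - (pN : Int) - 1 = ((sequence.length - pN - 1 : Nat) : Int) := by
    omega
  rw [e1, PySem.List.pyRange_zero_natCast, List.range_eq_range', hB]
  -- A side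
  have e2 : (sequence.length : Int) - 2 * (pN : Int) = ((sequence.length - 2 * pN : Nat) : Int) := by
    omega
  rw [pvAStart_eq_find?, e2,
    show PySem.List.pyRange 0 ((sequence.length - 2 * pN : Nat) : Int)
        = List.map (fun k : Nat => (k : Int)) (List.range (sequence.length - 2 * pN)) from
      PySem.List.pyRange_zero_natCast _,
    List.find?_map]
  congr 1
  apply pvFind?_congr
  intro s hs
  have hs' := List.mem_range.mp hs
  simpa [Function.comp] using (pvACheck_all sequence pN s (by omega)).symm

lemma pvMain_eq (sequence : List String) :
    ∀ l : List Int, (∀ p ∈ l, 1 ≤ p ∧ 2 * p ≤ (sequence.length : Int)) →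
      pvAMain sequence (sequence.length : Int) l = pvBMain sequence (sequence.length : Int) l := by
  intro l
  induction l with
  | nil => intro _; rfl
  | cons p t ih =>
    intro h
    obtain ⟨hp1, hp2⟩ := h p (by simp)
    rw [pvAMain, pvBMain, ← pvInner_eq sequence p hp1 hp2]
    cases pvBScan sequence p 0 (PySem.List.pyRange 0 ((sequence.length : Int) - p - 1)) with
    | none => exact ih (fun q hq => h q (by simp [hq]))
    | some s => rfl

-- ===== VERDICT (by name: the statement is the Claim_ definition above) =====
theorem detect_period_spec : Claim_equal_detect_period := by
  intro sequence _
  unfold Spec_detect_period detect_period detect_period_alt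
  by_cases h : (sequence.length : Int) < 2
  · rw [if_pos h]
    have h0 : PySem.Int.floordiv (sequence.length : Int) 2 = 0 := by
      rw [PySem.Int.floordiv_eq_iff_of_pos (by norm_num)]
      omega
    rw [h0]
    rfl
  · rw [if_neg h]
    apply pvMain_eq
    intro p hp
    obtain ⟨hp1, hp2⟩ := PySem.List.mem_pyRange_one.mp hp
    have h2 : p ≤ PySem.Int.floordiv (sequence.length : Int) 2 := by omega
    have := (PySem.Int.le_floordiv_iff_mul_le (by norm_num)).mp h2
    exact ⟨hp1, by omega⟩
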